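-- pv_equiv track=rewrite | github.com/UniqueYu8988/YuArchive | build_archive.py | map_steam_genre
-- ===== SOURCE A (Python) =====
-- def map_steam_genre(raw_genres: list[str]) -> str:
--     normalized = [g.lower() for g in raw_genres]
--     if any("rpg" in g or "role-playing" in g for g in normalized):
--         return "rpg"
--     if any("strategy" in g for g in normalized):
--         return "strategy"
--     if any("racing" in g for g in normalized):
--         return "racing"
--     if any("sports" in g for g in normalized):
--         return "sports"
--     if any("simulation" in g for g in normalized):
--         return "simulation"
--     if any("shooter" in g or "fps" in g for g in normalized):
--         return "shooter"
--     if any("puzzle" in g for g in normalized):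
--         return "puzzle"
--     if any("casual" in g for g in normalized):
--         return "casual"
--     if any("action" in g or "adventure" in g for g in normalized):
--         return "action"
--     return ""
-- ===== SOURCE B (Python) =====
-- _KEYWORDS = [
--     ("rpg", "rpg"), ("role-playing", "rpg"),
--     ("strategy", "strategy"),
--     ("racing", "racing"),
--     ("sports", "sports"),
--     ("simulation", "simulation"),
--     ("shooter", "shooter"), ("fps", "shooter"),
--     ("puzzle", "puzzle"),
--     ("casual", "casual"),
--     ("action", "action"), ("adventure", "action"),
-- ]
--
-- _PRIORITY = ["rpg", "strategy", "racing", "sports", "simulation",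
--              "shooter", "puzzle", "casual", "action"]
--
--
-- def map_steam_genre(raw_genres: list[str]) -> str:
--     matched = set()
--     for g in raw_genres:
--         gl = g.lower()
--         for kw, cat in _KEYWORDS:
--             if kw in gl:
--                 matched.add(cat)
--     for cat in _PRIORITY:
--         if cat in matched:
--             return cat
--     return ""
-- ===== Notes on version B (the rewrite author's own statement) =====
-- stated objective: alternative
-- what changed: Replaces nine repeated any()-scans of the genre list with a single pass that builds a set of matched canonical tags from a keyword table, followed by a lookup through a fixed priority list.
import Mathlib
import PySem

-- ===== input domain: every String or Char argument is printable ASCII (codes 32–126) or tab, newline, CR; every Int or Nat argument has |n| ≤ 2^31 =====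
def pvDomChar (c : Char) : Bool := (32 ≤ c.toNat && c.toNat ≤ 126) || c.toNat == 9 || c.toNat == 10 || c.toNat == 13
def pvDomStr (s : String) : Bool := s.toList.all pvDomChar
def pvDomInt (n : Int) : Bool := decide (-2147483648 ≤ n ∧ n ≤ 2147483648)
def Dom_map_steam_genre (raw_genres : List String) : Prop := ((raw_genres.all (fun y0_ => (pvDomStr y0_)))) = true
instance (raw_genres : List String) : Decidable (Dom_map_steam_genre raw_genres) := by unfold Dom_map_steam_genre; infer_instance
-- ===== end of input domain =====

-- B replaces A's nine repeated any()-scans with one pass building a set of matched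
-- canonical tags from a keyword table, then a lookup through a fixed priority list
-- (objective: alternative decomposition, same behaviour).

-- ===== PORT A =====
def map_steam_genre (raw_genres : List String) : String :=
  let normalized := raw_genres.map (fun g => PySem.Str.lower g)
  if normalized.any (fun g => PySem.Str.isIn "rpg" g || PySem.Str.isIn "role-playing" g) then "rpg"
  else if normalized.any (fun g => PySem.Str.isIn "strategy" g) then "strategy"
  else if normalized.any (fun g => PySem.Str.isIn "racing" g) then "racing"
  else if normalized.any (fun g => PySem.Str.isIn "sports" g) then "sports"
  else if normalized.any (fun g => PySem.Str.isIn "simulation" g) then "simulation"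
  else if normalized.any (fun g => PySem.Str.isIn "shooter" g || PySem.Str.isIn "fps" g) then "shooter"
  else if normalized.any (fun g => PySem.Str.isIn "puzzle" g) then "puzzle"
  else if normalized.any (fun g => PySem.Str.isIn "casual" g) then "casual"
  else if normalized.any (fun g => PySem.Str.isIn "action" g || PySem.Str.isIn "adventure" g) then "action"
  else ""

-- ===== PORT B =====
def bKeywords : List (String × String) :=
  [("rpg", "rpg"), ("role-playing", "rpg"),
   ("strategy", "strategy"),
   ("racing", "racing"),
   ("sports", "sports"),
   ("simulation", "simulation"),
   ("shooter", "shooter"), ("fps", "shooter"),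
   ("puzzle", "puzzle"),
   ("casual", "casual"),
   ("action", "action"), ("adventure", "action")]

def bPriority : List String :=
  ["rpg", "strategy", "racing", "sports", "simulation", "shooter", "puzzle", "casual", "action"]

-- 'for cat in _PRIORITY: if cat in matched: return cat / return ""'
def bFirstMatch (prio : List String) (matched : PySem.Set String) : String :=
  match prio with
  | [] => ""
  | cat :: rest => if PySem.Set.contains matched cat then cat else bFirstMatch rest matched

def map_steam_genre_alt (raw_genres : List String) : String :=
  let matched : PySem.Set String :=
    raw_genres.foldl (fun acc g =>
      let gl := PySem.Str.lower g
      bKeywords.foldl (fun acc p =>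
        if PySem.Str.isIn p.1 gl then PySem.Set.add acc p.2 else acc) acc)
      PySem.Set.empty
  bFirstMatch bPriority matched

-- ===== PRECONDITION & SPEC =====
def Spec_map_steam_genre (raw_genres : List String) (out : String) : Prop := out = map_steam_genre_alt raw_genres
instance (raw_genres : List String) (out : String) : Decidable (Spec_map_steam_genre raw_genres out) := by unfold Spec_map_steam_genre; infer_instance

-- ===== CLAIM (what is proved, stated in full; the proofs are below) =====
def Claim_equal_map_steam_genre : Prop := ∀ (raw_genres : List String), Dom_map_steam_genre raw_genres → Spec_map_steam_genre raw_genres (map_steam_genre raw_genres)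

-- ===== LEMMAS AND PROOFS =====

-- membership in a fold that conditionally adds the table's tags (keyword test kept abstract)
theorem mem_foldl_addIf {α : Type} (l : List (α × String)) (acc : PySem.Set String)
    (q : α → Bool) (c : String) :
    c ∈ l.foldl (fun a p => if q p.1 then PySem.Set.add a p.2 else a) acc ↔
      c ∈ acc ∨ ∃ p ∈ l, q p.1 = true ∧ p.2 = c := by
  induction l generalizing acc with
  | nil => simp
  | cons p rest ih =>
    simp only [List.foldl_cons, ih]
    by_cases h : q p.1 = true <;> simp only [h, if_true, PySem.Set.mem_add] <;> aesop

-- membership in the outer fold over the genre list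
theorem mem_foldl_outer {β α : Type} (l : List β) (kws : List (α × String))
    (Q : β → α → Bool) (acc : PySem.Set String) (c : String) :
    c ∈ l.foldl (fun acc g => kws.foldl (fun a p => if Q g p.1 then PySem.Set.add a p.2 else a) acc) acc ↔
      c ∈ acc ∨ ∃ g ∈ l, ∃ p ∈ kws, Q g p.1 = true ∧ p.2 = c := by
  induction l generalizing acc with
  | nil => simp
  | cons g rest ih =>
    simp only [List.foldl_cons, ih, mem_foldl_addIf]
    aesop

theorem contains_matched (raws : List String) (c : String) :
    PySem.Set.contains
      (raws.foldl (fun acc g =>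
        bKeywords.foldl (fun acc p =>
          if PySem.Str.isIn p.1 (PySem.Str.lower g) then PySem.Set.add acc p.2 else acc) acc)
        PySem.Set.empty) c =
      raws.any (fun g => bKeywords.any (fun p =>
        PySem.Str.isIn p.1 (PySem.Str.lower g) && p.2 == c)) := by
  rw [Bool.eq_iff_iff, PySem.Set.contains_iff,
    mem_foldl_outer raws bKeywords (fun g a => PySem.Str.isIn a (PySem.Str.lower g))]
  simp only [List.any_eq_true, Bool.and_eq_true, beq_iff_eq, PySem.Set.empty,
    List.not_mem_nil, false_or]

-- evaluating the keyword table at each canonical tag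
theorem inner_rpg (gl : String) :
    bKeywords.any (fun p => PySem.Str.isIn p.1 gl && p.2 == "rpg") =
      (PySem.Str.isIn "rpg" gl || PySem.Str.isIn "role-playing" gl) := by
  simp [bKeywords]

theorem inner_strategy (gl : String) :
    bKeywords.any (fun p => PySem.Str.isIn p.1 gl && p.2 == "strategy") =
      PySem.Str.isIn "strategy" gl := by
  simp [bKeywords]

theorem inner_racing (gl : String) :
    bKeywords.any (fun p => PySem.Str.isIn p.1 gl && p.2 == "racing") =
      PySem.Str.isIn "racing" gl := by
  simp [bKeywords]

theorem inner_sports (gl : String) :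
    bKeywords.any (fun p => PySem.Str.isIn p.1 gl && p.2 == "sports") =
      PySem.Str.isIn "sports" gl := by
  simp [bKeywords]

theorem inner_simulation (gl : String) :
    bKeywords.any (fun p => PySem.Str.isIn p.1 gl && p.2 == "simulation") =
      PySem.Str.isIn "simulation" gl := by
  simp [bKeywords]

theorem inner_shooter (gl : String) :
    bKeywords.any (fun p => PySem.Str.isIn p.1 gl && p.2 == "shooter") =
      (PySem.Str.isIn "shooter" gl || PySem.Str.isIn "fps" gl) := by
  simp [bKeywords]

theorem inner_puzzle (gl : String) :
    bKeywords.any (fun p => PySem.Str.isIn p.1 gl && p.2 == "puzzle") =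
      PySem.Str.isIn "puzzle" gl := by
  simp [bKeywords]

theorem inner_casual (gl : String) :
    bKeywords.any (fun p => PySem.Str.isIn p.1 gl && p.2 == "casual") =
      PySem.Str.isIn "casual" gl := by
  simp [bKeywords]

theorem inner_action (gl : String) :
    bKeywords.any (fun p => PySem.Str.isIn p.1 gl && p.2 == "action") =
      (PySem.Str.isIn "action" gl || PySem.Str.isIn "adventure" gl) := by
  simp [bKeywords]

-- ===== VERDICT (by name: the statement is the Claim_ definition above) =====
theorem map_steam_genre_spec : Claim_equal_map_steam_genre := by
  intro raws _
  unfold Spec_map_steam_genre map_steam_genre map_steam_genre_alt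
  simp only [bPriority, bFirstMatch, contains_matched, inner_rpg, inner_strategy, inner_racing,
    inner_sports, inner_simulation, inner_shooter, inner_puzzle, inner_casual, inner_action,
    List.any_map, Function.comp_def]
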